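-- pv_equiv track=rewrite | github.com/codesquad-backend-study/daily-algorithm-challenge | Hyun/N으로 표현.py | solution
-- ===== SOURCE A (Python) =====
-- def solution(N, number):
--     if N == number:
--         return 1
--
--     s = [set() for _ in range(8)]
--
--     for idx, sub_set in enumerate(s, start=1):
--         sub_set.add(int(str(N) * idx))
--
--     for i in range(1, 8):
--         for j in range(i):
--             for op1 in s[j]:
--                 for op2 in s[i - j - 1]:
--                     s[i].add(op1 + op2)
--                     s[i].add(op1 - op2)
--                     s[i].add(op1 * op2)
--                     if op2 != 0:
--                         s[i].add(op1 // op2)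
--
--         if number in s[i]:
--             return i + 1
--
--     return -1
-- ===== SOURCE B (Python) =====
-- def solution(N, number):
--     if N == number:
--         return 1
--     memo = {1: {int(str(N))}}
--
--     def reach(c):
--         # set of values formed from exactly c copies of N, memoized;
--         # only splits j <= c//2 are enumerated, with symmetric operator pairs
--         if c not in memo:
--             vals = {int(str(N) * c)}
--             for j in range(1, c // 2 + 1):
--                 for a in reach(j):
--                     for b in reach(c - j):
--                         vals |= {a + b, a * b, a - b, b - a}
--                         if b != 0:
--                             vals.add(a // b)
--                         if a != 0:
--                             vals.add(b // a)
--             memo[c] = vals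
--         return memo[c]
--
--     return next((c for c in range(2, 9) if number in reach(c)), -1)
-- ===== Notes on version B (the rewrite author's own statement) =====
-- stated objective: alternative
-- what changed: Replaces A's forward DP over all ordered splits with four operators by a memoized recursion reachable(c) that enumerates only unordered splits j <= c//2 and applies the six symmetric operator results (a+b, a*b, a-b, b-a, a//b, b//a), scanning counts 2..9 lazily; N==number keeps the count-1 shortcut.
import Mathlib
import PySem

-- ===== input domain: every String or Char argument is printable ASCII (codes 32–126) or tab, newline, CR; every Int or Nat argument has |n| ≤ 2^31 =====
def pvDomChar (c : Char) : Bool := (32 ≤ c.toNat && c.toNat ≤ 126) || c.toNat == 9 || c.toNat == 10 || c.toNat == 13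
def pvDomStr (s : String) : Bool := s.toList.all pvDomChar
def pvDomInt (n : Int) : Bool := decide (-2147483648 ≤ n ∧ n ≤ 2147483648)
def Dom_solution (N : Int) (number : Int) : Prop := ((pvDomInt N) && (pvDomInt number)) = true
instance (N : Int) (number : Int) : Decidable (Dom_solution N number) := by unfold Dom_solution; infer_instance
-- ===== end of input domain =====

-- B replaces A's forward triple-loop over all ordered splits (4 operators) by a memoized
-- recursion over unordered splits j ≤ c//2 with the symmetric 6-operator set; objective: alternative.
-- Python 'set' values are internal to both programs and only their MEMBERSHIP reaches the result,
-- so both ports carry them as Std.HashSet Int (membership-exact; iteration feeds only further sets).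

-- int(str(N) * k), total form: .getD 0 is unreachable under Pre_solution (there str(N)*k parses).
-- string repetition str(N)*k ported exactly as k-fold concatenation of str(N)'s characters
def pyRep (N : Int) (k : Nat) : Int :=
  (PySem.Int.ofChars? (List.flatten (List.replicate k (PySem.Int.toChars N)))).getD 0

-- ===== PORT A =====
-- body of A's triple loop at outer index i: adds into the accumulator (Python: into s[i])
def aCombine (s : List (Std.HashSet Int)) (i : Nat) : Std.HashSet Int :=
  (List.range i).foldl (fun acc j =>
    ((s.getD j ∅).toList).foldl (fun acc op1 =>
      ((s.getD (i - j - 1) ∅).toList).foldl (fun acc op2 =>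
        let acc := acc.insert (op1 + op2)
        let acc := acc.insert (op1 - op2)
        let acc := acc.insert (op1 * op2)
        if op2 ≠ 0 then acc.insert (PySem.Int.floordiv op1 op2) else acc)
        acc) acc)
    (s.getD i ∅)

-- A's 'for i in range(1, 8)' with its early return (indices are loop counters, always in range)
def aLoop (number : Int) (s : List (Std.HashSet Int)) (i : Nat) : Int :=
  if i < 8 then
    let s' := s.set i (aCombine s i)
    if (s'.getD i ∅).contains number then (i : Int) + 1
    else aLoop number s' (i + 1)
  else -1
termination_by 8 - i

def solution (N : Int) (number : Int) : Int :=
  if N = number then 1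
  else
    -- s = [set() for _ in range(8)]; for idx, sub in enumerate(s, 1): sub.add(int(str(N)*idx))
    aLoop number ((List.range 8).map (fun idx => (∅ : Std.HashSet Int).insert (pyRep N (idx + 1)))) 1

-- ===== PORT B =====
-- Source B's reach(c) body given the memo table t (t[k] holds reach(k+1), k+1 < c);
-- 'vals |= {a+b, a*b, a-b, b-a}' is the chain of four inserts
def bStep (N : Int) (t : List (Std.HashSet Int)) (c : Nat) : Std.HashSet Int :=
  (List.range' 1 (c / 2)).foldl (fun vals j =>
    ((t.getD (j - 1) ∅).toList).foldl (fun vals a =>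
      ((t.getD (c - j - 1) ∅).toList).foldl (fun vals b =>
        let vals := vals.insert (a + b)
        let vals := vals.insert (a * b)
        let vals := vals.insert (a - b)
        let vals := vals.insert (b - a)
        let vals := if b ≠ 0 then vals.insert (PySem.Int.floordiv a b) else vals
        if a ≠ 0 then vals.insert (PySem.Int.floordiv b a) else vals)
        vals) vals)
    ((∅ : Std.HashSet Int).insert (pyRep N c))

-- Source B's generator 'next((c for c in range(2, 9) if number in reach(c)), -1)':
-- reach(c) is demanded lazily, so the memo grows one level per tested c
def bLoop (N : Int) (number : Int) (t : List (Std.HashSet Int)) (c : Nat) : Int :=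
  if c < 9 then
    let v := bStep N t c
    if v.contains number then (c : Int)
    else bLoop N number (t ++ [v]) (c + 1)
  else -1
termination_by 9 - c

def solution_alt (N : Int) (number : Int) : Int :=
  if N = number then 1
  else bLoop N number [(∅ : Std.HashSet Int).insert (pyRep N 1)] 2

-- ===== PRECONDITION & SPEC =====
-- Pre_ excludes exactly the inputs where the Python raises ValueError: N < 0 with N ≠ number,
-- where int(str(N)*c) is called with c ≥ 2 on a string like "-3-3" (both A and B raise there).
def Pre_solution (N : Int) (number : Int) : Prop := N = number ∨ 0 ≤ N
instance (N : Int) (number : Int) : Decidable (Pre_solution N number) := by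
  unfold Pre_solution; infer_instance

def pvWitness_solution : Int × Int := (2, 10)

def Spec_solution (N : Int) (number : Int) (out : Int) : Prop := out = solution_alt N number
instance (N : Int) (number : Int) (out : Int) : Decidable (Spec_solution N number out) := by
  unfold Spec_solution; infer_instance

-- ===== CLAIM (what is proved, stated in full; the proofs are below) =====
def Claim_equal_solution : Prop := ∀ (N : Int) (number : Int), Dom_solution N number → Pre_solution N number → Spec_solution N number (solution N number)

-- ===== LEMMAS AND PROOFS =====

-- membership in a foldl that only inserts, characterised by a per-element predicate
theorem mem_foldl_of_step {β : Type} (g : Std.HashSet Int → β → Std.HashSet Int) (Q : β → Int → Prop)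
    (hg : ∀ acc y x, x ∈ g acc y ↔ x ∈ acc ∨ Q y x) :
    ∀ (l : List β) (acc : Std.HashSet Int) (x : Int),
      x ∈ l.foldl g acc ↔ x ∈ acc ∨ ∃ y ∈ l, Q y x := by
  intro l
  induction l with
  | nil => simp
  | cons y ys ih =>
    intro acc x
    simp only [List.foldl_cons, ih, hg, List.mem_cons]
    constructor
    · rintro (((h | h) | ⟨z, hz, hQ⟩))
      · exact Or.inl h
      · exact Or.inr ⟨y, Or.inl rfl, h⟩
      · exact Or.inr ⟨z, Or.inr hz, hQ⟩
    · rintro (h | ⟨z, (rfl | hz), hQ⟩)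
      · exact Or.inl (Or.inl h)
      · exact Or.inl (Or.inr hQ)
      · exact Or.inr ⟨z, hz, hQ⟩

def Q4 (a b x : Int) : Prop :=
  a + b = x ∨ a - b = x ∨ a * b = x ∨ (b ≠ 0 ∧ PySem.Int.floordiv a b = x)

def Q6 (a b x : Int) : Prop :=
  a + b = x ∨ a * b = x ∨ a - b = x ∨ b - a = x ∨
    (b ≠ 0 ∧ PySem.Int.floordiv a b = x) ∨ (a ≠ 0 ∧ PySem.Int.floordiv b a = x)

theorem mem_aCombine (s : List (Std.HashSet Int)) (i : Nat) (x : Int) :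
    x ∈ aCombine s i ↔ x ∈ s.getD i ∅ ∨
      ∃ j < i, ∃ a ∈ s.getD j ∅, ∃ b ∈ s.getD (i - j - 1) ∅, Q4 a b x := by
  unfold aCombine
  rw [mem_foldl_of_step _
      (fun j x => ∃ a ∈ s.getD j ∅, ∃ b ∈ s.getD (i - j - 1) ∅, Q4 a b x)]
  · simp [List.mem_range]
  · intro acc j x
    rw [mem_foldl_of_step _
        (fun a x => ∃ b ∈ s.getD (i - j - 1) ∅, Q4 a b x)]
    · simp [Std.HashSet.mem_toList]
    · intro acc a x
      rw [mem_foldl_of_step _ (fun b x => Q4 a b x)]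
      · simp [Std.HashSet.mem_toList]
      · intro acc b x
        simp only [Q4]
        split_ifs with hb <;> simp [Std.HashSet.mem_insert, beq_iff_eq, hb] <;> tauto

theorem mem_bStep (N : Int) (t : List (Std.HashSet Int)) (c : Nat) (x : Int) :
    x ∈ bStep N t c ↔ pyRep N c = x ∨
      ∃ j, 1 ≤ j ∧ j ≤ c / 2 ∧
        ∃ a ∈ t.getD (j - 1) ∅, ∃ b ∈ t.getD (c - j - 1) ∅, Q6 a b x := by
  unfold bStep
  rw [mem_foldl_of_step _
      (fun j x => ∃ a ∈ t.getD (j - 1) ∅, ∃ b ∈ t.getD (c - j - 1) ∅, Q6 a b x)]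
  · constructor
    · rintro (h | ⟨j, hj, hQ⟩)
      · left; simpa [Std.HashSet.mem_insert, beq_iff_eq] using h
      · right; rw [List.mem_range'_1] at hj; exact ⟨j, hj.1, by omega, hQ⟩
    · rintro (h | ⟨j, h1, h2, hQ⟩)
      · left; simp [Std.HashSet.mem_insert, h]
      · right; exact ⟨j, by rw [List.mem_range'_1]; omega, hQ⟩
  · intro acc j x
    rw [mem_foldl_of_step _
        (fun a x => ∃ b ∈ t.getD (c - j - 1) ∅, Q6 a b x)]
    · simp [Std.HashSet.mem_toList]
    · intro acc a x
      rw [mem_foldl_of_step _ (fun b x => Q6 a b x)]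
      · simp [Std.HashSet.mem_toList]
      · intro acc b x
        simp only [Q6]
        split_ifs with hb ha <;> simp [Std.HashSet.mem_insert, beq_iff_eq, hb] <;> tauto

-- the bridge: all ordered splits with 4 operators = half the splits with 6 symmetric operators
theorem combine_eq_step (N : Int) (s t : List (Std.HashSet Int)) (i : Nat)
    (hmem : ∀ k < i, ∀ x : Int, x ∈ s.getD k ∅ ↔ x ∈ t.getD k ∅)
    (hsing : ∀ x : Int, x ∈ s.getD i ∅ ↔ pyRep N (i + 1) = x) :
    ∀ x : Int, x ∈ aCombine s i ↔ x ∈ bStep N t (i + 1) := by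
  intro x
  rw [mem_aCombine, mem_bStep, hsing]
  constructor
  · rintro (h | ⟨j, hj, a, ha, b, hb, hQ⟩)
    · exact Or.inl h
    · right
      rw [hmem j hj] at ha
      rw [hmem (i - j - 1) (by omega)] at hb
      by_cases hsmall : j + 1 ≤ (i + 1) / 2
      · refine ⟨j + 1, by omega, hsmall, a, by simpa using ha, b, ?_, ?_⟩
        · have : i + 1 - (j + 1) - 1 = i - j - 1 := by omega
          rw [this]; exact hb
        · rcases hQ with h | h | h | h <;> simp only [Q6] <;> tauto
      · -- use the mirrored split (i - j) with operands swapped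
        refine ⟨i - j, by omega, by omega, b, ?_, a, ?_, ?_⟩
        · simpa using hb
        · have : i + 1 - (i - j) - 1 = j := by omega
          rw [this]; exact ha
        · rcases hQ with h | h | h | h
          · exact Or.inl (by omega)
          · exact Or.inr (Or.inr (Or.inr (Or.inl h)))
          · exact Or.inr (Or.inl (by rw [Int.mul_comm]; exact h))
          · exact Or.inr (Or.inr (Or.inr (Or.inr (Or.inr h))))
  · rintro (h | ⟨j, hj1, hj2, a, ha, b, hb, hQ⟩)
    · exact Or.inl h
    · right
      have hji : j - 1 < i := by omega
      have hji' : i + 1 - j - 1 < i := by omega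
      rw [← hmem (j - 1) hji] at ha
      rw [← hmem (i + 1 - j - 1) (by omega)] at hb
      rcases hQ with h | h | h | h | h | h
      · exact ⟨j - 1, hji, a, ha, b, by rw [show i - (j-1) - 1 = i + 1 - j - 1 by omega]; exact hb,
          Or.inl h⟩
      · exact ⟨j - 1, hji, a, ha, b, by rw [show i - (j-1) - 1 = i + 1 - j - 1 by omega]; exact hb,
          Or.inr (Or.inr (Or.inl h))⟩
      · exact ⟨j - 1, hji, a, ha, b, by rw [show i - (j-1) - 1 = i + 1 - j - 1 by omega]; exact hb,
          Or.inr (Or.inl h)⟩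
      · exact ⟨i + 1 - j - 1, hji', b, hb, a,
          by rw [show i - (i + 1 - j - 1) - 1 = j - 1 by omega]; exact ha, Or.inr (Or.inl h)⟩
      · exact ⟨j - 1, hji, a, ha, b, by rw [show i - (j-1) - 1 = i + 1 - j - 1 by omega]; exact hb,
          Or.inr (Or.inr (Or.inr h))⟩
      · exact ⟨i + 1 - j - 1, hji', b, hb, a,
          by rw [show i - (i + 1 - j - 1) - 1 = j - 1 by omega]; exact ha,
          Or.inr (Or.inr (Or.inr h))⟩

-- loop invariant relating A's in-place array s to B's growing memo table t at step i (count i+1)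
def LoopInv (N : Int) (s t : List (Std.HashSet Int)) (i : Nat) : Prop :=
  s.length = 8 ∧ t.length = i ∧
    (∀ k < i, ∀ x : Int, x ∈ s.getD k ∅ ↔ x ∈ t.getD k ∅) ∧
    (∀ k, i ≤ k → k < 8 → ∀ x : Int, x ∈ s.getD k ∅ ↔ pyRep N (k + 1) = x)

theorem loops_eq (N number : Int) :
    ∀ (n i : Nat), i = 8 - n → 1 ≤ i → ∀ s t : List (Std.HashSet Int), LoopInv N s t i →
      aLoop number s i = bLoop N number t (i + 1) := by
  intro n
  induction n with
  | zero =>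
    intro i hi _ s t _
    subst hi
    rw [aLoop, bLoop]
    norm_num
  | succ m ih =>
    intro i hi h1i s t hInv
    obtain ⟨hs8, ht, hmem, hsing⟩ := hInv
    by_cases hlt : i < 8
    · rw [aLoop, bLoop, if_pos hlt, if_pos (by omega : i + 1 < 9)]
      have hcomb := combine_eq_step N s t i hmem (hsing i (Nat.le_refl i) hlt)
      have hgetD : (s.set i (aCombine s i)).getD i ∅ = aCombine s i := by
        simp [List.getD_eq_getElem?_getD, List.getElem?_set_self (by omega : i < s.length)]
      have hcont : ((s.set i (aCombine s i)).getD i ∅).contains number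
          = (bStep N t (i + 1)).contains number := by
        rw [hgetD]
        have h := hcomb number
        rw [← Std.HashSet.contains_iff_mem, ← Std.HashSet.contains_iff_mem] at h
        cases h2 : (aCombine s i).contains number <;> cases h3 : (bStep N t (i + 1)).contains number <;>
          simp_all
      show (if ((s.set i (aCombine s i)).getD i ∅).contains number = true
            then (i : Int) + 1 else aLoop number (s.set i (aCombine s i)) (i + 1)) =
          (if (bStep N t (i + 1)).contains number = true
            then ((i + 1 : Nat) : Int) else bLoop N number (t ++ [bStep N t (i + 1)]) (i + 1 + 1))
      rw [hcont]
      rcases hc : (bStep N t (i + 1)).contains number with _ | _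
      · simp only [Bool.false_eq_true, if_false]
        apply ih (i + 1) (by omega) (by omega)
        refine ⟨by simp [hs8], by simp [ht], ?_, ?_⟩
        · intro k hk x
          by_cases hki : k = i
          · subst hki
            rw [hgetD]
            have htk : (t ++ [bStep N t (k + 1)]).getD k ∅ = bStep N t (k + 1) := by
              simp [List.getD_eq_getElem?_getD, ht]
            rw [htk]
            exact hcomb x
          · have h1 : (s.set i (aCombine s i)).getD k ∅ = s.getD k ∅ := by
              simp [List.getD_eq_getElem?_getD, List.getElem?_set_ne (by omega : i ≠ k)]
            have h2 : (t ++ [bStep N t (i + 1)]).getD k ∅ = t.getD k ∅ := by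
              simp [List.getD_eq_getElem?_getD, List.getElem?_append_left (by omega : k < t.length)]
            rw [h1, h2]
            exact hmem k (by omega) x
        · intro k hk hk8 x
          have h1 : (s.set i (aCombine s i)).getD k ∅ = s.getD k ∅ := by
            simp [List.getD_eq_getElem?_getD, List.getElem?_set_ne (by omega : i ≠ k)]
          rw [h1]
          exact hsing k (by omega) hk8 x
      · simp only [if_true]
        push_cast
        ring
    · omega

-- membership in A's and B's initial tables
theorem init_inv (N : Int) :
    LoopInv N ((List.range 8).map (fun idx => (∅ : Std.HashSet Int).insert (pyRep N (idx + 1))))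
      [(∅ : Std.HashSet Int).insert (pyRep N 1)] 1 := by
  refine ⟨by simp, by simp, ?_, ?_⟩
  · intro k hk x
    interval_cases k
    simp [List.getD_eq_getElem?_getD, Std.HashSet.mem_insert, beq_iff_eq]
  · intro k hk hk8 x
    have : (((List.range 8).map (fun idx => (∅ : Std.HashSet Int).insert (pyRep N (idx + 1)))).getD k
        ∅) = (∅ : Std.HashSet Int).insert (pyRep N (k + 1)) := by
      simp [List.getD_eq_getElem?_getD, hk8]
    rw [this]
    simp [Std.HashSet.mem_insert, beq_iff_eq]

-- ===== VERDICT (by name: the statement is the Claim_ definition above) =====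
theorem solution_spec : Claim_equal_solution := by
  intro N number _ _
  unfold Spec_solution solution solution_alt
  by_cases h : N = number
  · simp [h]
  · simp only [if_neg h]
    exact loops_eq N number 7 1 (by omega) (by omega) _ _ (init_inv N)
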